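-- pv_equiv track=rewrite | github.com/Vol0kin/ugr-ptc | Sesion4/ejercicio10.py | version_1
-- ===== SOURCE A (Python) =====
-- def version_1(frase):
--     # Eliminar espacios
--     frase_no_space = frase.replace(' ', '')
--
--     # Lista vacia que contendra las letras
--     letras = []
--
--     # Obtener letras
--     for l in frase_no_space:
--         if not l in letras:
--             letras.append(l)
--
--     num_letras = len(letras)
--
--     # Ordenar letras mediante seleccion
--     for i in range(num_letras):
--         l = letras[i]
--         min_idx = i
--         min_val = ord(l)
--
--         for j in range(i+1, num_letras):
--             if ord(letras[j]) < min_val: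
--                 min_idx = j
--                 min_val = ord(letras[j])
--
--         letras[i], letras[min_idx] = letras[min_idx], l
--
--     # Obtener frecuencias
--     frec_dict = {l: 0 for l in letras}
--
--     for l in frase_no_space:
--         frec_dict[l] += 1
--
--     # Convertir a lista de tuplas
--     letras_frec = [(l, f) for l, f in frec_dict.items()]
--
--     return letras_frec
-- ===== SOURCE B (Python) =====
-- def version_1(frase):
--     # Sort the space-stripped characters once, then emit run lengths in one pass.
--     s = sorted(frase.replace(' ', ''))
--     res = []
--     prev = None
--     cnt = 0
--     for ch in s:
--         if prev is not None and ch == prev: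
--             cnt += 1
--         else:
--             if prev is not None:
--                 res.append((prev, cnt))
--             prev = ch
--             cnt = 1
--     if prev is not None:
--         res.append((prev, cnt))
--     return res
-- ===== Notes on version B (the rewrite author's own statement) =====
-- stated objective: idiomatic
-- what changed: Replaces A's three phases (membership-scan dedup, hand-written selection sort, counting dict) with the standard sort-then-group-runs pass: sort the space-stripped characters once and emit (char, run length) in one scan.
import Mathlib
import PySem

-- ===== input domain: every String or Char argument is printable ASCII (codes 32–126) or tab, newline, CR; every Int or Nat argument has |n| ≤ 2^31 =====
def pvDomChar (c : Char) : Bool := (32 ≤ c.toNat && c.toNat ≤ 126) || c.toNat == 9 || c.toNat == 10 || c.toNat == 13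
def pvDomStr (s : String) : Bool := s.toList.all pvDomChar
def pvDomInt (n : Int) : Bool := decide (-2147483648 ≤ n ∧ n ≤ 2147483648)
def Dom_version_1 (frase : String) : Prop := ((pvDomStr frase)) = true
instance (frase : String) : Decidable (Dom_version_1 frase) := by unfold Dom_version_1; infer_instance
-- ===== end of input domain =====

-- B replaces A's three phases (membership-scan dedup, selection sort, counting dict) with the
-- idiomatic sort-then-group-runs pass; same return value on every input.

-- ===== PORT A =====
-- Python ord of a one-character string
def pvOrd (c : Char) : Int := (c.toNat : Int)

-- inner loop of the selection sort: scan j in range(i+1, n) keeping (min_idx, min_val)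
def pvSelInner (ls : List Char) (n i : Int) : Int × Int :=
  (PySem.List.pyRange (i + 1) n 1).foldl
    (fun p j =>
      if pvOrd (PySem.List.pyGetD ls j ' ') < p.2
      then (j, pvOrd (PySem.List.pyGetD ls j ' '))
      else p)
    (i, pvOrd (PySem.List.pyGetD ls i ' '))

-- one iteration of the outer loop: find the minimum of letras[i:] and swap it into place i
-- (i and min_idx are always in [0, n), so .toNat is exact for these nonnegative indices)
def pvSelStep (n : Int) (ls : List Char) (i : Int) : List Char :=
  let l := PySem.List.pyGetD ls i ' '
  let m := pvSelInner ls n i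
  (ls.set i.toNat (PySem.List.pyGetD ls m.1 ' ')).set m.1.toNat l

def version_1 (frase : String) : List (String × Int) :=
  let fns := (PySem.Str.replace frase " " "").toList
  let letras := fns.foldl (fun acc l => if l ∈ acc then acc else acc ++ [l]) []
  let numLetras : Int := letras.length
  let letras := (PySem.List.pyRange 0 numLetras 1).foldl (pvSelStep numLetras) letras
  -- frec_dict = {l: 0 for l in letras}; then frec_dict[l] += 1 (the key is always present,
  -- so Dict.modify with default 0 is exact here)
  let frecDict := letras.foldl (fun d l => d.insert l (0 : Int)) PySem.Dict.empty
  let frecDict := fns.foldl (fun d l => d.modify l 0 (· + 1)) frecDict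
  frecDict.items.map (fun lf => (String.ofList [lf.1], lf.2))

-- ===== PORT B =====
-- one step of the run-length loop over the sorted characters (state: res, prev, cnt)
def pvRleStep (st : List (String × Int) × Option Char × Int) (ch : Char) :
    List (String × Int) × Option Char × Int :=
  match st with
  | (res, some p, cnt) =>
      if ch = p then (res, some p, cnt + 1)
      else (res ++ [(String.ofList [p], cnt)], some ch, 1)
  | (res, none, _) => (res, some ch, 1)

def version_1_alt (frase : String) : List (String × Int) :=
  let s := PySem.List.sorted ((PySem.Str.replace frase " " "").toList) (fun c => c) false
  let st := s.foldl pvRleStep ([], none, 0)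
  match st with
  | (res, some p, cnt) => res ++ [(String.ofList [p], cnt)]
  | (res, none, _) => res

-- ===== PRECONDITION & SPEC =====
def Spec_version_1 (frase : String) (out : List (String × Int)) : Prop := out = version_1_alt frase
instance (frase : String) (out : List (String × Int)) : Decidable (Spec_version_1 frase out) := by unfold Spec_version_1; infer_instance

-- ===== CLAIM (what is proved, stated in full; the proofs are below) =====
def Claim_equal_version_1 : Prop := ∀ (frase : String), Dom_version_1 frase → Spec_version_1 frase (version_1 frase)

-- ===== LEMMAS AND PROOFS =====

def SelInv (i : Nat) (ls : List Char) : Prop :=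
  (ls.take i).Pairwise (· < ·) ∧ ∀ a ∈ ls.take i, ∀ b ∈ ls.drop i, a < b

theorem selInner_loop (ls : List Char) (n i : Int) (k : Nat) :
    ∀ (a : Int) (p : Int × Int), a + k = n → i < a →
    i ≤ p.1 → p.1 < n → p.2 = pvOrd (PySem.List.pyGetD ls p.1 ' ') →
    (∀ j : Int, i ≤ j → j < a → p.2 ≤ pvOrd (PySem.List.pyGetD ls j ' ')) →
    let q := (PySem.List.pyRange a n 1).foldl
      (fun p j => if pvOrd (PySem.List.pyGetD ls j ' ') < p.2
                  then (j, pvOrd (PySem.List.pyGetD ls j ' ')) else p) p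
    i ≤ q.1 ∧ q.1 < n ∧ q.2 = pvOrd (PySem.List.pyGetD ls q.1 ' ') ∧
      ∀ j : Int, i ≤ j → j < n → q.2 ≤ pvOrd (PySem.List.pyGetD ls j ' ') := by
  induction k with
  | zero =>
      intro a p ha hia h1 h2 h3 h4
      rw [PySem.List.pyRange_one_eq_nil (by omega)]
      exact ⟨h1, h2, h3, fun j hj hj' => h4 j hj (by omega)⟩
  | succ k ih =>
      intro a p ha hia h1 h2 h3 h4
      rw [PySem.List.pyRange_one_cons (by omega), List.foldl_cons]
      by_cases hlt : pvOrd (PySem.List.pyGetD ls a ' ') < p.2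
      · rw [if_pos hlt]
        exact ih (a + 1) _ (by omega) (by omega) (by omega) (by omega) rfl
          (fun j hj hj' => by
            rcases lt_or_ge j a with h | h
            · exact le_of_lt (lt_of_lt_of_le hlt (h4 j hj h))
            · have : j = a := by omega
              simp [this])
      · rw [if_neg hlt]
        exact ih (a + 1) p (by omega) (by omega) h1 h2 h3
          (fun j hj hj' => by
            rcases lt_or_ge j a with h | h
            · exact h4 j hj h
            · have : j = a := by omega
              rw [this]; omega)

theorem selInner_spec (ls : List Char) (n i : Int)
    (h0 : 0 ≤ i) (hi : i < n) :
    i ≤ (pvSelInner ls n i).1 ∧ (pvSelInner ls n i).1 < n ∧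
    (pvSelInner ls n i).2 = pvOrd (PySem.List.pyGetD ls (pvSelInner ls n i).1 ' ') ∧
    ∀ j : Int, i ≤ j → j < n → (pvSelInner ls n i).2 ≤ pvOrd (PySem.List.pyGetD ls j ' ') := by
  have := selInner_loop ls n i (n - (i+1)).toNat (i + 1)
    (i, pvOrd (PySem.List.pyGetD ls i ' ')) (by omega) (by omega) le_rfl hi rfl
    (fun j hj hj' => le_of_eq (by rw [show j = i by omega]))
  exact this

theorem pvOrd_le_iff (a b : Char) : pvOrd a ≤ pvOrd b ↔ a ≤ b := by
  rw [pvOrd, pvOrd, Int.ofNat_le, Char.le_def, UInt32.le_iff_toNat_le]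
  exact Iff.rfl

theorem swap_eq (T M R : List Char) (a b : Char) :
    ((T ++ (a :: (M ++ (b :: R)))).set T.length b).set (T.length + 1 + M.length) a
      = T ++ (b :: (M ++ (a :: R))) := by
  rw [List.set_append, if_neg (by omega)]
  simp only [Nat.sub_self, List.set_cons_zero]
  rw [show T ++ (b :: (M ++ (b :: R))) = (T ++ (b :: M)) ++ (b :: R) by simp]
  rw [List.set_append, if_neg (by simp only [List.length_append, List.length_cons]; omega)]
  have h1 : T.length + 1 + M.length - (T ++ (b :: M)).length = 0 := by
    simp only [List.length_append, List.length_cons]; omega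
  rw [h1, List.set_cons_zero]
  simp

theorem swap_perm (T M R : List Char) (a b : Char) :
    (T ++ (b :: (M ++ (a :: R)))).Perm (T ++ (a :: (M ++ (b :: R)))) := by
  refine List.Perm.append_left T ?_
  exact (List.Perm.cons b List.perm_middle).trans
    ((List.Perm.swap a b (M ++ R)).trans (List.Perm.cons a List.perm_middle.symm))

theorem pyGetD_nonneg (ls : List Char) (j : Int) (h0 : 0 ≤ j) (h : j.toNat < ls.length) :
    PySem.List.pyGetD ls j ' ' = ls[j.toNat] := by
  have hh := PySem.List.pyGetD_natCast ls j.toNat ' '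
  rw [Int.toNat_of_nonneg h0] at hh
  rw [hh, List.getD_eq_getElem]

theorem list_decomp (ls : List Char) (i' m' : Nat) (h1 : i' < m') (h2 : m' < ls.length) :
    ∃ M R, (ls.take i').length = i' ∧ (ls.take i').length + 1 + M.length = m' ∧
      ls = ls.take i' ++ (ls[i']'(by omega) :: (M ++ ((ls[m']'h2) :: R))) := by
  refine ⟨(ls.drop (i' + 1)).take (m' - i' - 1), ls.drop (m' + 1), ?_, ?_, ?_⟩
  · simp; omega
  · simp; omega
  · conv_lhs => rw [← List.take_append_drop i' ls]
    congr 1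
    rw [List.drop_eq_getElem_cons (by omega)]
    congr 1
    conv_lhs => rw [← List.take_append_drop (m' - i' - 1) (ls.drop (i' + 1))]
    congr 1
    rw [List.drop_drop]
    rw [show i' + 1 + (m' - i' - 1) = m' by omega]
    rw [List.drop_eq_getElem_cons (by omega)]

theorem selStep_spec (ls : List Char) (n i : Int) (hn : ls.length = n.toNat)
    (h0 : 0 ≤ i) (hi : i < n) (hnd : ls.Nodup) (hinv : SelInv i.toNat ls) :
    (pvSelStep n ls i).Perm ls ∧ SelInv (i.toNat + 1) (pvSelStep n ls i) := by
  obtain ⟨hm1, hm2, hmv, hP⟩ := selInner_spec ls n i h0 hi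
  set m := (pvSelInner ls n i).1 with hmdef
  have hm0 : 0 ≤ m := le_trans h0 hm1
  have hii : i.toNat < ls.length := by omega
  have hmm : m.toNat < ls.length := by omega
  have him : i.toNat ≤ m.toNat := by omega
  have hgi : PySem.List.pyGetD ls i ' ' = ls[i.toNat] := pyGetD_nonneg ls i h0 hii
  have hgm : PySem.List.pyGetD ls m ' ' = ls[m.toNat] := pyGetD_nonneg ls m hm0 hmm
  have hstep : pvSelStep n ls i = (ls.set i.toNat ls[m.toNat]).set m.toNat ls[i.toNat] := by
    rw [pvSelStep]; rw [hgi, hgm]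
  -- the selected element is ≤ every element of the tail (by ord), i.e. minimal
  have hmin : ∀ y ∈ ls.drop i.toNat, ls[m.toNat] ≤ y := by
    intro y hy
    rw [List.mem_iff_getElem] at hy
    obtain ⟨j', hj', rfl⟩ := hy
    rw [List.getElem_drop]
    have hjb : i.toNat + j' < ls.length := by simp at hj'; omega
    have := hP ((i.toNat + j' : Nat) : Int) (by omega) (by omega)
    rw [hmv, hgm, PySem.List.pyGetD_natCast, List.getD_eq_getElem _ _ hjb] at this
    exact (pvOrd_le_iff _ _).mp this
  have hdropi : ls.drop i.toNat = ls[i.toNat] :: ls.drop (i.toNat + 1) :=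
    List.drop_eq_getElem_cons hii
  by_cases heq : m.toNat = i.toNat
  · -- min already in place: the two sets cancel and the list is unchanged
    have hab : ls[m.toNat]'hmm = ls[i.toNat]'hii := by simp only [heq]
    have hr : pvSelStep n ls i = ls := by
      rw [hstep, hab, List.set_getElem_self, heq, List.set_getElem_self]
    rw [hr]
    refine ⟨List.Perm.refl ls, ?_, ?_⟩
    · rw [List.take_succ, List.getElem?_eq_getElem hii]
      rw [List.pairwise_append]
      refine ⟨hinv.1, by simp, ?_⟩
      intro x hx y hy
      simp at hy; subst hy
      exact hinv.2 x hx _ (by rw [hdropi]; exact List.mem_cons_self)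
    · intro x hx y hy
      have hy' : y ∈ ls.drop i.toNat := by rw [hdropi]; exact List.mem_cons_of_mem _ hy
      rw [List.take_succ, List.getElem?_eq_getElem hii, List.mem_append] at hx
      rcases hx with hx | hx
      · exact hinv.2 x hx y hy'
      · simp at hx; subst hx
        have hle : ls[i.toNat] ≤ y := by
          have hh := hmin y hy'
          rw [hab] at hh
          exact hh
        have hne : ls[i.toNat] ≠ y := by
          have h2 := (List.take_append_drop (i.toNat + 1) ls) ▸ hnd
          rw [List.nodup_append] at h2
          have hmem1 : ls[i.toNat] ∈ ls.take (i.toNat + 1) := by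
            rw [List.take_succ, List.getElem?_eq_getElem hii, List.mem_append]
            exact Or.inr (by simp)
          exact h2.2.2 _ hmem1 y hy
        exact lt_of_le_of_ne hle hne
  · -- genuine swap
    have hlt : i.toNat < m.toNat := by omega
    obtain ⟨M, R, hT, hTM, hdec⟩ := list_decomp ls i.toNat m.toNat hlt hmm
    set T := ls.take i.toNat
    set a := ls[i.toNat]
    set b := ls[m.toNat]
    have hr : pvSelStep n ls i = T ++ (b :: (M ++ (a :: R))) := by
      rw [hstep]
      conv_lhs => rw [hdec]
      rw [show i.toNat = T.length from hT.symm, show m.toNat = T.length + 1 + M.length by omega]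
      exact swap_eq T M R a b
    have hperm : (pvSelStep n ls i).Perm ls := by
      rw [hr]; conv_rhs => rw [hdec]
      exact swap_perm T M R a b
    have hrtake : (pvSelStep n ls i).take (i.toNat + 1) = T ++ [b] := by
      rw [hr, show i.toNat + 1 = T.length + 1 by omega, List.take_append,
        List.take_of_length_le (by omega)]
      simp
    have hrdrop : (pvSelStep n ls i).drop (i.toNat + 1) = M ++ (a :: R) := by
      rw [hr, show i.toNat + 1 = T.length + 1 by omega, List.drop_append,
        List.drop_of_length_le (by omega)]
      simp
    have hdropi' : ls.drop i.toNat = a :: (M ++ (b :: R)) := by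
      conv_lhs => rw [hdec, show i.toNat = T.length from hT.symm, List.drop_left]
    have hbmem : b ∈ ls.drop i.toNat := by rw [hdropi']; simp
    have hrnodup : (pvSelStep n ls i).Nodup := hperm.nodup_iff.mpr hnd
    have hbnot : b ∉ M ++ (a :: R) := by
      have h2 := hr ▸ hrnodup
      rw [List.nodup_append] at h2
      exact (List.nodup_cons.mp h2.2.1).1
    have hmemdrop : ∀ y ∈ M ++ (a :: R), y ∈ ls.drop i.toNat := by
      intro y hy
      rw [hdropi']
      simp only [List.mem_append, List.mem_cons] at hy ⊢
      tauto
    refine ⟨hperm, ?_, ?_⟩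
    · rw [hrtake, List.pairwise_append]
      exact ⟨hinv.1, by simp, fun x hx y hy => by
        simp at hy; subst hy; exact hinv.2 x hx b hbmem⟩
    · intro x hx y hy
      rw [hrtake] at hx
      rw [hrdrop] at hy
      rw [List.mem_append] at hx
      rcases hx with hx | hx
      · exact hinv.2 x hx y (hmemdrop y hy)
      · simp at hx; subst hx
        exact lt_of_le_of_ne (hmin y (hmemdrop y hy)) (fun hby => hbnot (hby ▸ hy))

theorem selSort_loop (n : Int) (k : Nat) :
    ∀ (i : Int) (ls : List Char), 0 ≤ i → i + k = n → ls.length = n.toNat →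
    ls.Nodup → SelInv i.toNat ls →
    ((PySem.List.pyRange i n 1).foldl (pvSelStep n) ls).Perm ls ∧
    ((PySem.List.pyRange i n 1).foldl (pvSelStep n) ls).Pairwise (· < ·) := by
  induction k with
  | zero =>
      intro i ls h0 hk hlen hnd hinv
      rw [PySem.List.pyRange_one_eq_nil (by omega)]
      refine ⟨List.Perm.refl ls, ?_⟩
      have : ls.take i.toNat = ls := List.take_of_length_le (by omega)
      simpa [this] using hinv.1
  | succ k ih =>
      intro i ls h0 hk hlen hnd hinv
      rw [PySem.List.pyRange_one_cons (by omega), List.foldl_cons]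
      obtain ⟨hperm, hinv'⟩ := selStep_spec ls n i hlen h0 (by omega) hnd hinv
      have hlen' : (pvSelStep n ls i).length = n.toNat := by
        rw [hperm.length_eq, hlen]
      have hinv'' : SelInv (i + 1).toNat (pvSelStep n ls i) := by
        rwa [show (i + 1).toNat = i.toNat + 1 by omega]
      obtain ⟨p2, pw⟩ := ih (i + 1) (pvSelStep n ls i) (by omega) (by omega) hlen'
        (hperm.nodup_iff.mpr hnd) hinv''
      exact ⟨p2.trans hperm, pw⟩

theorem selSort_eq (ls : List Char) (hnd : ls.Nodup) :
    (PySem.List.pyRange 0 (ls.length : Int) 1).foldl (pvSelStep (ls.length : Int)) ls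
      = PySem.List.sorted ls (fun c => c) false := by
  obtain ⟨hperm, hpw⟩ := selSort_loop (ls.length : Int) ls.length 0 ls (le_refl 0)
    (by omega) (by omega) hnd (by constructor <;> simp [SelInv])
  exact (PySem.List.sorted_eq_of_perm_of_pairwise_lt ls _ (fun c => c) hperm hpw).symm

theorem keys_insert_of_contains {d : PySem.Dict Char Int} {k : Char} (v : Int)
    (h : d.contains k = true) : (d.insert k v).keys = d.keys := by
  rw [PySem.Dict.insert, if_pos h, PySem.Dict.keys, PySem.Dict.keys]
  simp only [PySem.Dict.items]
  rw [List.map_map]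
  refine List.map_congr_left ?_
  intro p _
  simp only [Function.comp]
  split
  · next hbeq => exact (eq_of_beq hbeq).symm
  · rfl

theorem contains_iff_mem_keys (d : PySem.Dict Char Int) (k : Char) :
    d.contains k = true ↔ k ∈ d.keys := by
  rw [PySem.Dict.contains, PySem.Dict.keys, List.any_eq_true]
  constructor
  · rintro ⟨p, hp, hbeq⟩; exact List.mem_map.mpr ⟨p, hp, eq_of_beq hbeq⟩
  · rintro hk
    obtain ⟨p, hp, rfl⟩ := List.mem_map.mp hk
    exact ⟨p, hp, beq_self_eq_true _⟩

theorem d0_keys (letras : List Char) (hnd : letras.Nodup) :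
    ∀ pre : List (Char × Int), (∀ l ∈ letras, (PySem.Dict.mk pre).contains l = false) →
    letras.foldl (fun d l => d.insert l (0 : Int)) (PySem.Dict.mk pre)
      = PySem.Dict.mk (pre ++ letras.map (fun l => (l, 0))) := by
  induction letras with
  | nil => intro pre _; simp
  | cons x t ih =>
      intro pre hf
      rw [List.foldl_cons, PySem.Dict.insert, if_neg (by simp [hf x List.mem_cons_self])]
      simp only [PySem.Dict.items]
      rw [ih (List.nodup_cons.mp hnd).2 (pre ++ [(x, 0)]) ?_]
      · simp
      · intro l hl
        have h1 := hf l (List.mem_cons_of_mem _ hl)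
        have hxl : (x == l) = false := by
          simp only [beq_eq_false_iff_ne]
          exact fun hxe => (List.nodup_cons.mp hnd).1 (hxe ▸ hl)
        rw [PySem.Dict.contains] at h1 ⊢
        simp only [PySem.Dict.items] at h1 ⊢
        rw [List.any_append]
        simp [h1, hxl]

theorem d0_getD (letras : List Char) :
    ∀ d : PySem.Dict Char Int, (∀ k, d.getD k 0 = 0) →
    ∀ k, (letras.foldl (fun d l => d.insert l (0 : Int)) d).getD k 0 = 0 := by
  induction letras with
  | nil => intro d hd k; exact hd k
  | cons x t ih =>
      intro d hd k
      rw [List.foldl_cons]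
      refine ih _ ?_ k
      intro k'
      by_cases hk : k' = x
      · subst hk; rw [PySem.Dict.getD_insert_self]
      · rw [PySem.Dict.getD_insert_of_ne _ _ _ hk, hd]

theorem keys_count_fold (cs : List Char) :
    ∀ d : PySem.Dict Char Int, (∀ c ∈ cs, c ∈ d.keys) →
    (cs.foldl (fun d l => d.modify l 0 (· + 1)) d).keys = d.keys := by
  induction cs with
  | nil => intro d _; rfl
  | cons x t ih =>
      intro d hc
      rw [List.foldl_cons]
      have hk : (d.modify x 0 (· + 1)).keys = d.keys := by
        rw [PySem.Dict.keys_modify,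
          keys_insert_of_contains _ ((contains_iff_mem_keys d x).mpr (hc x List.mem_cons_self))]
      rw [ih _ (fun c hct => by rw [hk]; exact hc c (List.mem_cons_of_mem _ hct)), hk]

theorem dict_items (letras cs : List Char) (hnd : letras.Nodup)
    (hsub : ∀ c ∈ cs, c ∈ letras) :
    (cs.foldl (fun d l => d.modify l 0 (· + 1))
      (letras.foldl (fun d l => d.insert l (0 : Int)) PySem.Dict.empty)).items
      = letras.map (fun l => (l, (cs.count l : Int))) := by
  set d0 := letras.foldl (fun d l => d.insert l (0 : Int)) PySem.Dict.empty with hd0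
  have hd0eq : d0 = PySem.Dict.mk (letras.map (fun l => (l, 0))) := by
    rw [hd0, show (PySem.Dict.empty : PySem.Dict Char Int) = PySem.Dict.mk [] from rfl,
      d0_keys letras hnd [] (fun l _ => rfl)]
    simp
  have hkeys0 : d0.keys = letras := by
    rw [hd0eq, PySem.Dict.keys]
    simp only [PySem.Dict.items, List.map_map]
    exact (List.map_congr_left (fun l _ => rfl)).trans (List.map_id _)
  set d1 := cs.foldl (fun d l => d.modify l 0 (· + 1)) d0 with hd1
  have hkeys1 : d1.keys = letras := by
    rw [hd1, keys_count_fold cs d0 (fun c hc => by rw [hkeys0]; exact hsub c hc), hkeys0]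
  have hgetD : ∀ k, d1.getD k 0 = (cs.count k : Int) := by
    intro k
    rw [hd1, PySem.Dict.getD_foldl_modify_add_one, d0_getD letras _ (fun k' => rfl)]
    ring
  rw [PySem.Dict.items_eq_map_keys d1 (by rw [hkeys1]; exact hnd) 0, hkeys1]
  exact List.map_congr_left (fun l _ => by rw [hgetD])

theorem dedup_append_singleton (u : List Char) (c : Char) :
    PySem.List.dedup (u ++ [c]) =
      if c ∈ u then PySem.List.dedup u else PySem.List.dedup u ++ [c] := by
  simp only [PySem.List.dedup, PySem.Set.ofList, List.foldl_append, List.foldl_cons, List.foldl_nil]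
  rw [show (List.foldl PySem.Set.add PySem.Set.empty u) = PySem.Set.ofList u from rfl]
  unfold PySem.Set.add
  by_cases hc : c ∈ u
  · simp [PySem.Set.mem_ofList, hc]
  · simp [PySem.Set.mem_ofList, hc]

theorem rle_loop (s : List Char) :
    s.Pairwise (· ≤ ·) → s ≠ [] →
    ∃ ds c, PySem.List.dedup s = ds ++ [c] ∧ (∀ x ∈ s, x ≤ c) ∧
      s.foldl pvRleStep ([], none, 0) =
        (ds.map (fun x => (String.ofList [x], (s.count x : Int))), some c, (s.count c : Int)) := by
  induction s using List.reverseRecOn with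
  | nil => intro _ h; exact absurd rfl h
  | append_singleton u ch ih =>
      intro hpw _
      rw [List.pairwise_append] at hpw
      obtain ⟨hpu, -, hcross⟩ := hpw
      have hmax : ∀ x ∈ u, x ≤ ch := fun x hx => hcross x hx ch (by simp)
      by_cases hu : u = []
      · subst hu
        refine ⟨[], ch, by simp [PySem.List.dedup, PySem.Set.ofList, PySem.Set.add, PySem.Set.empty], by simp, ?_⟩
        simp [pvRleStep]
      · obtain ⟨ds, c, hdu, hcmax, hfold⟩ := ih hpu hu
        have hcu : c ∈ u := by
          have : c ∈ PySem.List.dedup u := by rw [hdu]; simp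
          exact (PySem.Set.mem_ofList u c).mp this
        rw [List.foldl_append, List.foldl_cons, List.foldl_nil, hfold]
        by_cases hceq : ch = c
        · -- same run continues
          subst hceq
          refine ⟨ds, ch, ?_, ?_, ?_⟩
          · rw [dedup_append_singleton, if_pos hcu, hdu]
          · intro x hx
            rcases List.mem_append.mp hx with hx | hx
            · exact hcmax x hx
            · simp at hx; subst hx; exact le_refl _
          · rw [pvRleStep, if_pos rfl]
            have hnd : (PySem.List.dedup u).Nodup := by
              rw [PySem.List.dedup]; exact PySem.Set.nodup_ofList u
            rw [hdu, List.nodup_append] at hnd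
            have hmapeq : ds.map (fun x => (String.ofList [x], ((u ++ [ch]).count x : Int)))
                = ds.map (fun x => (String.ofList [x], (u.count x : Int))) := by
              refine List.map_congr_left (fun x hx => ?_)
              have hxch : x ≠ ch := fun hxe => hnd.2.2 x hx ch (by simp) hxe
              have h0 : List.count x [ch] = 0 := List.count_eq_zero.mpr (by simp [hxch])
              rw [List.count_append, h0, Nat.add_zero]
            rw [hmapeq]
            simp [List.count_append]
        · -- new run starts
          have hchu : ch ∉ u := by
            intro hmem
            exact hceq (le_antisymm (hcmax ch hmem) (hmax c hcu))
          refine ⟨ds ++ [c], ch, ?_, ?_, ?_⟩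
          · rw [dedup_append_singleton, if_neg hchu, hdu]
          · intro x hx
            rcases List.mem_append.mp hx with hx | hx
            · exact hmax x hx
            · simp at hx; subst hx; exact le_refl _
          · rw [pvRleStep, if_neg hceq]
            have hcount : ∀ x, x ∈ ds ∨ x = c → (u ++ [ch]).count x = u.count x := by
              intro x hx
              have hxu : x ∈ u := by
                rcases hx with hx | hx
                · refine (PySem.Set.mem_ofList u x).mp ?_
                  show x ∈ PySem.List.dedup u
                  rw [hdu]; exact List.mem_append.mpr (Or.inl hx)
                · subst hx; exact hcu
              have h0 : List.count x [ch] = 0 :=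
                List.count_eq_zero.mpr (by simp; exact fun hxe => hchu (hxe ▸ hxu))
              rw [List.count_append, h0, Nat.add_zero]
            have hmapeq : (ds ++ [c]).map (fun x => (String.ofList [x], ((u ++ [ch]).count x : Int)))
                = ds.map (fun x => (String.ofList [x], (u.count x : Int))) ++ [(String.ofList [c], (u.count c : Int))] := by
              rw [List.map_append]
              congr 1
              · exact List.map_congr_left (fun x hx => by rw [hcount x (Or.inl hx)])
              · have h0 : List.count c [ch] = 0 :=
                  List.count_eq_zero.mpr (by simp; exact fun h => hceq h.symm)
                simp [List.count_append, h0]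
            rw [hmapeq]
            simp [List.count_append, List.count_eq_zero.mpr hchu]

theorem fold_dedup (xs : List Char) :
    xs.foldl (fun acc l => if l ∈ acc then acc else acc ++ [l]) [] = PySem.List.dedup xs := by
  suffices h : ∀ acc : List Char, xs.foldl (fun acc l => if l ∈ acc then acc else acc ++ [l]) acc = xs.foldl PySem.Set.add acc by
    simpa [PySem.List.dedup, PySem.Set.ofList, PySem.Set.empty] using h []
  induction xs with
  | nil => intro acc; rfl
  | cons x t ih =>
      intro acc
      simp only [List.foldl_cons, PySem.Set.add]
      by_cases hx : x ∈ acc <;> simp [hx, ih]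

theorem dedup_sublist (xs : List Char) : (PySem.List.dedup xs).Sublist xs := by
  suffices h : ∀ acc : List Char, (xs.foldl PySem.Set.add acc).Sublist (acc ++ xs) by
    simpa [PySem.List.dedup, PySem.Set.ofList, PySem.Set.empty] using h []
  induction xs with
  | nil => intro acc; simp
  | cons x t ih =>
      intro acc
      simp only [List.foldl_cons]
      refine (ih (PySem.Set.add acc x)).trans ?_
      unfold PySem.Set.add
      split
      · exact List.Sublist.append_left (List.sublist_cons_self _ _) _
      · simpa using List.Sublist.append_right (l := acc ++ [x]) (by simp) t

theorem pairwise_lt_of_le_nodup {l : List Char}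
    (hle : l.Pairwise (· ≤ ·)) (hnd : l.Nodup) : l.Pairwise (· < ·) :=
  (hle.and hnd).imp (fun h => lt_of_le_of_ne h.1 h.2)

set_option maxHeartbeats 1000000 in
theorem version_1_eq (frase : String) : version_1 frase = version_1_alt frase := by
  simp only [version_1, version_1_alt]
  set cs := (PySem.Str.replace frase " " "").toList with hcs
  rw [fold_dedup]
  set L := PySem.List.dedup cs with hL
  have hLnd : L.Nodup := PySem.Set.nodup_ofList cs
  rw [selSort_eq L hLnd]
  set L' := PySem.List.sorted L (fun c => c) false with hL'
  have hL'nd : L'.Nodup := (PySem.List.sorted_perm L _ false).nodup_iff.mpr hLnd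
  have hsub : ∀ c ∈ cs, c ∈ L' := by
    intro c hc
    rw [hL', PySem.List.mem_sorted]
    exact (PySem.Set.mem_ofList cs c).mpr hc
  rw [dict_items L' cs hL'nd hsub, List.map_map]
  set s := PySem.List.sorted cs (fun c => c) false with hs
  have hscount : ∀ x, s.count x = cs.count x :=
    fun x => (PySem.List.sorted_perm cs _ false).count_eq x
  by_cases hcs0 : cs = []
  · have hL0 : L = [] := by rw [hL, hcs0]; rfl
    have hs0 : s = [] := by rw [hs, hcs0]; rfl
    have hL'0 : L' = [] := by rw [hL', hL0]; rfl
    rw [hL'0, hs0]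
    simp
  · have hsne : s ≠ [] := fun h => hcs0 ((PySem.List.sorted_eq_nil_iff cs _ false).mp h)
    have hspw : s.Pairwise (· ≤ ·) := PySem.List.sorted_pairwise cs (fun c => c)
    obtain ⟨ds, c, hdu, hcmax, hfold⟩ := rle_loop s hspw hsne
    rw [hfold]
    -- identify L' with dedup s
    have hperm : (PySem.List.dedup s).Perm L := by
      refine (List.perm_ext_iff_of_nodup (PySem.Set.nodup_ofList s) hLnd).mpr ?_
      intro a
      have h1 : a ∈ PySem.List.dedup s ↔ a ∈ s := PySem.Set.mem_ofList s a
      have h2 : a ∈ PySem.List.dedup cs ↔ a ∈ cs := PySem.Set.mem_ofList cs a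
      rw [hL]
      show a ∈ PySem.List.dedup s ↔ a ∈ PySem.List.dedup cs
      rw [h1, h2, hs, PySem.List.mem_sorted]
    have hpwlt : (PySem.List.dedup s).Pairwise (· < ·) :=
      pairwise_lt_of_le_nodup (List.Pairwise.sublist (dedup_sublist s) hspw) (PySem.Set.nodup_ofList s)
    have hL'eq : L' = PySem.List.dedup s :=
      PySem.List.sorted_eq_of_perm_of_pairwise_lt L _ (fun c => c) hperm hpwlt
    rw [hL'eq, hdu]
    rw [List.map_append]
    congr 1
    · exact List.map_congr_left (fun x _ => by simp [Function.comp, hscount x])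
    · simp [Function.comp, hscount c]

-- ===== VERDICT (by name: the statement is the Claim_ definition above) =====
theorem version_1_spec : Claim_equal_version_1 := by
  intro frase _
  exact version_1_eq frase
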